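-- pv_equiv track=rewrite | github.com/fmonfasani/PM_Agent_Startup | pm-bot-enterprise/core/planner.py | _extract_database_type
-- ===== SOURCE A (Python) =====
-- from typing import Dict, List, Any, Tuple, Optional
--
-- def _extract_database_type(tech_stack: List[str]) -> str:
--     """Extraer tipo de base de datos del tech stack"""
--     for tech in tech_stack:
--         if 'postgresql' in tech.lower() or 'postgres' in tech.lower():
--             return 'PostgreSQL'
--         elif 'mongodb' in tech.lower() or 'mongo' in tech.lower():
--             return 'MongoDB'
--         elif 'mysql' in tech.lower():
--             return 'MySQL'
--         elif 'firebase' in tech.lower():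
--             return 'Firebase'
--     return 'PostgreSQL'  # Default
-- ===== SOURCE B (Python) =====
-- _DB_TABLE = [('postgres', 'PostgreSQL'), ('mongo', 'MongoDB'),
--              ('mysql', 'MySQL'), ('firebase', 'Firebase')]
--
-- def _extract_database_type(tech_stack):
--     """Extraer tipo de base de datos del tech stack"""
--     lowered = [t.lower() for t in tech_stack]
--     candidates = []
--     for prio, (kw, db) in enumerate(_DB_TABLE):
--         for i, t in enumerate(lowered):
--             if kw in t:
--                 candidates.append((i, prio, db))
--                 break
--     if not candidates:
--         return 'PostgreSQL'
--     return min(candidates)[2]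
-- ===== Notes on version B (the rewrite author's own statement) =====
-- stated objective: alternative
-- what changed: Inverts the traversal: instead of scanning techs and returning at the first if/elif hit, B makes one pass per database keyword to record the first tech index matching it, then takes the lexicographic minimum of the (index, priority) candidates, with 'PostgreSQL' when no candidate exists.
import Mathlib
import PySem

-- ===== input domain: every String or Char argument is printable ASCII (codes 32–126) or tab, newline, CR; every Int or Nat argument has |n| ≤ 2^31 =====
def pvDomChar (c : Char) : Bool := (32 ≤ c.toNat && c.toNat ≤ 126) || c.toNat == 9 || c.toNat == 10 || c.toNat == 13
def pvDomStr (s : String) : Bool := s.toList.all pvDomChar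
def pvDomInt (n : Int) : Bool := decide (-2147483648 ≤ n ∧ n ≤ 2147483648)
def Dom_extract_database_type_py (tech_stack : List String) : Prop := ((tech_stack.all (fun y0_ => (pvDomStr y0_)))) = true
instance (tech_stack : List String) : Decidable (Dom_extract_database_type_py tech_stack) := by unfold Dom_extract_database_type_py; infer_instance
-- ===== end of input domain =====

-- B inverts the traversal: one pass per database keyword recording the first
-- matching tech index, then the lexicographic minimum of the (index, priority)
-- candidates; alternative algorithm, same cost.

-- ===== PORT A =====
def extract_database_type_py : List String → String
  | [] => "PostgreSQL"  -- Default
  | tech :: rest =>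
    if PySem.Str.isIn "postgresql" (PySem.Str.lower tech)
        || PySem.Str.isIn "postgres" (PySem.Str.lower tech) then "PostgreSQL"
    else if PySem.Str.isIn "mongodb" (PySem.Str.lower tech)
        || PySem.Str.isIn "mongo" (PySem.Str.lower tech) then "MongoDB"
    else if PySem.Str.isIn "mysql" (PySem.Str.lower tech) then "MySQL"
    else if PySem.Str.isIn "firebase" (PySem.Str.lower tech) then "Firebase"
    else extract_database_type_py rest

-- ===== PORT B =====
def dbTable : List (String × String) :=
  [("postgres", "PostgreSQL"), ("mongo", "MongoDB"),
   ("mysql", "MySQL"), ("firebase", "Firebase")]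

-- inner loop: "for i, t in enumerate(lowered): if kw in t: … break" — first index matching kw
def firstMatch (kw : String) : List String → Nat → Option Nat
  | [], _ => none
  | t :: ts, i => if PySem.Str.isIn kw t then some i else firstMatch kw ts (i + 1)

-- Python tuple '<' on (i, prio, db)
def tripLt (a b : Nat × Int × String) : Bool :=
  decide (a.1 < b.1 ∨ (a.1 = b.1 ∧ (a.2.1 < b.2.1 ∨ (a.2.1 = b.2.1 ∧ a.2.2 < b.2.2))))

-- Python min (first minimal element)
def pyMinT : List (Nat × Int × String) → Option (Nat × Int × String)
  | [] => none
  | x :: xs => some (xs.foldl (fun m y => if tripLt y m then y else m) x)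

-- outer loop: one candidate (first index, priority, db) per keyword that occurs
def candidatesOf (lowered : List String) : List (Nat × Int × String) :=
  (PySem.List.enumerate dbTable).filterMap (fun pe =>
    (firstMatch pe.2.1 lowered 0).map (fun i => (i, pe.1, pe.2.2)))

def extract_database_type_py_alt (tech_stack : List String) : String :=
  let lowered := tech_stack.map PySem.Str.lower
  match pyMinT (candidatesOf lowered) with
  | none => "PostgreSQL"
  | some c => c.2.2

-- ===== PRECONDITION & SPEC =====
def Spec_extract_database_type_py (tech_stack : List String) (out : String) : Prop := out = extract_database_type_py_alt tech_stack
instance (tech_stack : List String) (out : String) : Decidable (Spec_extract_database_type_py tech_stack out) := by unfold Spec_extract_database_type_py; infer_instance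

-- ===== CLAIM =====
def Claim_equal_extract_database_type_py : Prop := ∀ (tech_stack : List String), Dom_extract_database_type_py tech_stack → Spec_extract_database_type_py tech_stack (extract_database_type_py tech_stack)

-- ===== LEMMAS AND PROOFS =====

theorem str_isIn_mono (a b l : String) (h : a.toList <:+: b.toList)
    (hb : PySem.Str.isIn b l = true) : PySem.Str.isIn a l = true := by
  rw [PySem.Str.isIn_iff_infix] at hb ⊢
  exact h.trans hb

theorem firstMatch_succ (kw : String) (l : List String) (i : Nat) :
    firstMatch kw l (i + 1) = (firstMatch kw l i).map (· + 1) := by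
  induction l generalizing i with
  | nil => rfl
  | cons t ts ih =>
    simp only [firstMatch]
    by_cases h : PySem.Str.isIn kw t = true
    · rw [if_pos h, if_pos h, Option.map_some]
    · rw [if_neg h, if_neg h]
      exact ih (i + 1)

theorem firstMatch_cons (kw t : String) (ts : List String) :
    firstMatch kw (t :: ts) 0 =
      if PySem.Str.isIn kw t then some 0 else (firstMatch kw ts 0).map (· + 1) := by
  simp only [firstMatch]
  by_cases h : PySem.Str.isIn kw t = true
  · rw [if_pos h, if_pos h]
  · rw [if_neg h, if_neg h]
    exact firstMatch_succ kw ts 0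

def shiftT (y : Nat × Int × String) : Nat × Int × String := (y.1 + 1, y.2)

theorem tripLt_shift (a b : Nat × Int × String) : tripLt (shiftT a) (shiftT b) = tripLt a b := by
  simp only [tripLt, shiftT, decide_eq_decide]
  constructor
  · rintro (h | ⟨he, h⟩)
    · exact Or.inl (by omega)
    · exact Or.inr ⟨by omega, h⟩
  · rintro (h | ⟨he, h⟩)
    · exact Or.inl (by omega)
    · exact Or.inr ⟨by omega, h⟩

theorem tripLt_irrefl (a : Nat × Int × String) : tripLt a a = false := by
  simp [tripLt]

theorem tripLt_asymm (a b : Nat × Int × String) (h : tripLt a b = true) : tripLt b a = false := by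
  simp only [tripLt, decide_eq_true_eq, decide_eq_false_iff_not] at h ⊢
  rcases h with h | ⟨he, h | ⟨he2, h⟩⟩
  · rintro (h' | ⟨he', _⟩) <;> omega
  · rintro (h' | ⟨he', h' | ⟨he2', _⟩⟩) <;> omega
  · rintro (h' | ⟨he', h' | ⟨he2', h'⟩⟩)
    · omega
    · omega
    · exact absurd h' (not_lt_of_gt h)

theorem tripLt_of_pos (x y : Nat × Int × String) (hx : x.1 = 0) (hy : 0 < y.1) :
    tripLt x y = true := by
  simp only [tripLt, decide_eq_true_eq]
  exact Or.inl (by omega)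

theorem tripLt_of_prio (x y : Nat × Int × String) (hx : x.1 = 0) (h : x.2.1 < y.2.1) :
    tripLt x y = true := by
  simp only [tripLt, decide_eq_true_eq]
  rcases Nat.eq_zero_or_pos y.1 with h0 | h0
  · exact Or.inr ⟨by omega, Or.inl h⟩
  · exact Or.inl (by omega)

theorem foldl_min_inv (x : Nat × Int × String) :
    ∀ (l : List (Nat × Int × String)) (acc : Nat × Int × String),
    (acc = x ∨ (tripLt x acc = true ∧ x ∈ l)) →
    (∀ y ∈ l, y = x ∨ tripLt x y = true) →
    l.foldl (fun m y => if tripLt y m then y else m) acc = x := by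
  intro l
  induction l with
  | nil =>
    intro acc hacc _
    rcases hacc with h | ⟨_, h⟩
    · exact h
    · exact absurd h (List.not_mem_nil)
  | cons y rs ih =>
    intro acc hacc hall
    simp only [List.foldl_cons]
    by_cases hy : y = x
    · subst hy
      rcases hacc with rfl | ⟨hlt, _⟩
      · rw [tripLt_irrefl]
        simp only [Bool.false_eq_true, if_false]
        exact ih acc (Or.inl rfl) (fun z hz => hall z (List.mem_cons_of_mem _ hz))
      · rw [hlt]
        simp only [if_true]
        exact ih y (Or.inl rfl) (fun z hz => hall z (List.mem_cons_of_mem _ hz))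
    · have hxy : tripLt x y = true := by
        rcases hall y List.mem_cons_self with h | h
        · exact absurd h hy
        · exact h
      rcases hacc with rfl | ⟨hlt, hmem⟩
      · rw [tripLt_asymm _ _ hxy]
        simp only [Bool.false_eq_true, if_false]
        exact ih acc (Or.inl rfl) (fun z hz => hall z (List.mem_cons_of_mem _ hz))
      · have hmem' : x ∈ rs := by
          rcases List.mem_cons.1 hmem with h | h
          · exact absurd h.symm hy
          · exact h
        by_cases hc : tripLt y acc = true
        · rw [if_pos hc]
          exact ih y (Or.inr ⟨hxy, hmem'⟩) (fun z hz => hall z (List.mem_cons_of_mem _ hz))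
        · rw [if_neg hc]
          exact ih acc (Or.inr ⟨hlt, hmem'⟩) (fun z hz => hall z (List.mem_cons_of_mem _ hz))

theorem pyMinT_eq_of_min (c : List (Nat × Int × String)) (x : Nat × Int × String)
    (hx : x ∈ c) (hmin : ∀ y ∈ c, y = x ∨ tripLt x y = true) : pyMinT c = some x := by
  cases c with
  | nil => exact absurd hx (List.not_mem_nil)
  | cons a rest =>
    simp only [pyMinT, Option.some.injEq]
    rcases List.mem_cons.1 hx with rfl | hmem
    · exact foldl_min_inv x rest x (Or.inl rfl) (fun z hz => hmin z (List.mem_cons_of_mem _ hz))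
    · rcases hmin a List.mem_cons_self with rfl | hlt
      · exact foldl_min_inv a rest a (Or.inl rfl) (fun z hz => hmin z (List.mem_cons_of_mem _ hz))
      · exact foldl_min_inv x rest a (Or.inr ⟨hlt, hmem⟩) (fun z hz => hmin z (List.mem_cons_of_mem _ hz))

theorem pyMinT_map_shift (c : List (Nat × Int × String)) :
    pyMinT (c.map shiftT) = (pyMinT c).map shiftT := by
  cases c with
  | nil => rfl
  | cons a rest =>
    simp only [List.map_cons, pyMinT, Option.map_some, Option.some.injEq, List.foldl_map]
    induction rest generalizing a with
    | nil => rfl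
    | cons y rs ih =>
      simp only [List.foldl_cons, tripLt_shift]
      by_cases h : tripLt y a = true
      · rw [if_pos h, if_pos h]
        exact ih y
      · rw [if_neg h, if_neg h]
        exact ih a

-- explicit shape of the candidate list: one optional entry per keyword
def optC (o : Option Nat) (p : Int) (d : String) (rest : List (Nat × Int × String)) :
    List (Nat × Int × String) :=
  match o with
  | some i => (i, p, d) :: rest
  | none => rest

theorem candidatesOf_eq (lw : List String) :
    candidatesOf lw =
      optC (firstMatch "postgres" lw 0) 0 "PostgreSQL"
        (optC (firstMatch "mongo" lw 0) 1 "MongoDB"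
          (optC (firstMatch "mysql" lw 0) 2 "MySQL"
            (optC (firstMatch "firebase" lw 0) 3 "Firebase" []))) := by
  cases o1 : firstMatch "postgres" lw 0 <;> cases o2 : firstMatch "mongo" lw 0 <;>
    cases o3 : firstMatch "mysql" lw 0 <;> cases o4 : firstMatch "firebase" lw 0 <;>
    simp [candidatesOf, dbTable, PySem.List.enumerate, optC, o1, o2, o3, o4]

theorem mem_optC (y : Nat × Int × String) (o : Option Nat) (p : Int) (d : String)
    (rest : List (Nat × Int × String)) (h : y ∈ optC o p d rest) :
    (∃ i, o = some i ∧ y = (i, p, d)) ∨ y ∈ rest := by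
  cases o with
  | none => exact Or.inr h
  | some i =>
    rcases List.mem_cons.1 h with rfl | h
    · exact Or.inl ⟨i, rfl, rfl⟩
    · exact Or.inr h

theorem prio_bound (q : Int) (o : Option Nat) (p : Int) (d : String)
    (rest : List (Nat × Int × String)) (hpq : q < p) (hrest : ∀ y ∈ rest, q < y.2.1) :
    ∀ y ∈ optC o p d rest, q < y.2.1 := by
  intro y hy
  rcases mem_optC y o p d rest hy with ⟨i, _, rfl⟩ | hy
  · exact hpq
  · exact hrest y hy

theorem prio_nil (q : Int) : ∀ y ∈ ([] : List (Nat × Int × String)), q < y.2.1 :=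
  fun _ hy => absurd hy (List.not_mem_nil)

theorem optC_map_shift (o : Option Nat) (p : Int) (d : String)
    (rest : List (Nat × Int × String)) :
    optC (o.map (· + 1)) p d (rest.map shiftT) = (optC o p d rest).map shiftT := by
  cases o <;> simp [optC, shiftT]

-- the head candidate with index 0 and the smallest priority is the minimum,
-- past a prefix of (at most 3) candidates with positive index
theorem pyMinT_zero_head (x : Nat × Int × String) (rest : List (Nat × Int × String))
    (hx : x.1 = 0) (hrest : ∀ y ∈ rest, x.2.1 < y.2.1) : pyMinT (x :: rest) = some x := by
  apply pyMinT_eq_of_min _ _ List.mem_cons_self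
  intro y hy
  rcases List.mem_cons.1 hy with rfl | hy
  · exact Or.inl rfl
  · exact Or.inr (tripLt_of_prio x y hx (hrest y hy))

theorem pyMinT_pre1 (e x : Nat × Int × String) (rest : List (Nat × Int × String))
    (he : 0 < e.1) (hx : x.1 = 0) (hrest : ∀ y ∈ rest, x.2.1 < y.2.1) :
    pyMinT (e :: x :: rest) = some x := by
  apply pyMinT_eq_of_min _ _ (List.mem_cons_of_mem _ List.mem_cons_self)
  intro y hy
  rcases List.mem_cons.1 hy with rfl | hy
  · exact Or.inr (tripLt_of_pos x y hx he)
  · rcases List.mem_cons.1 hy with rfl | hy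
    · exact Or.inl rfl
    · exact Or.inr (tripLt_of_prio x y hx (hrest y hy))

theorem pyMinT_pre2 (e1 e2 x : Nat × Int × String) (rest : List (Nat × Int × String))
    (he1 : 0 < e1.1) (he2 : 0 < e2.1) (hx : x.1 = 0) (hrest : ∀ y ∈ rest, x.2.1 < y.2.1) :
    pyMinT (e1 :: e2 :: x :: rest) = some x := by
  apply pyMinT_eq_of_min _ _ (List.mem_cons_of_mem _ (List.mem_cons_of_mem _ List.mem_cons_self))
  intro y hy
  rcases List.mem_cons.1 hy with rfl | hy
  · exact Or.inr (tripLt_of_pos x y hx he1)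
  · rcases List.mem_cons.1 hy with rfl | hy
    · exact Or.inr (tripLt_of_pos x y hx he2)
    · rcases List.mem_cons.1 hy with rfl | hy
      · exact Or.inl rfl
      · exact Or.inr (tripLt_of_prio x y hx (hrest y hy))

theorem pyMinT_pre3 (e1 e2 e3 x : Nat × Int × String) (rest : List (Nat × Int × String))
    (he1 : 0 < e1.1) (he2 : 0 < e2.1) (he3 : 0 < e3.1) (hx : x.1 = 0)
    (hrest : ∀ y ∈ rest, x.2.1 < y.2.1) :
    pyMinT (e1 :: e2 :: e3 :: x :: rest) = some x := by
  apply pyMinT_eq_of_min _ _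
    (List.mem_cons_of_mem _ (List.mem_cons_of_mem _ (List.mem_cons_of_mem _ List.mem_cons_self)))
  intro y hy
  rcases List.mem_cons.1 hy with rfl | hy
  · exact Or.inr (tripLt_of_pos x y hx he1)
  · rcases List.mem_cons.1 hy with rfl | hy
    · exact Or.inr (tripLt_of_pos x y hx he2)
    · rcases List.mem_cons.1 hy with rfl | hy
      · exact Or.inr (tripLt_of_pos x y hx he3)
      · rcases List.mem_cons.1 hy with rfl | hy
        · exact Or.inl rfl
        · exact Or.inr (tripLt_of_prio x y hx (hrest y hy))

-- ===== VERDICT =====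
theorem extract_database_type_py_spec : Claim_equal_extract_database_type_py := by
  intro tech_stack hdom
  clear hdom
  unfold Spec_extract_database_type_py
  induction tech_stack with
  | nil => rfl
  | cons tech rest ih =>
    rw [extract_database_type_py]
    simp only [extract_database_type_py_alt, List.map_cons, candidatesOf_eq, firstMatch_cons] at ih ⊢
    cases h1 : PySem.Str.isIn "postgres" (PySem.Str.lower tech) with
    | true =>
      simp only [Bool.or_true, if_true, optC]
      rw [pyMinT_zero_head _ _ rfl
        (prio_bound 0 _ 1 _ _ (by decide)
          (prio_bound 0 _ 2 _ _ (by decide)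
            (prio_bound 0 _ 3 _ _ (by decide) (prio_nil 0))))]
    | false =>
      have h1q : PySem.Str.isIn "postgresql" (PySem.Str.lower tech) = false := by
        cases hq : PySem.Str.isIn "postgresql" (PySem.Str.lower tech) with
        | false => rfl
        | true =>
          have := str_isIn_mono "postgres" "postgresql" _ (by decide) hq
          rw [h1] at this
          exact absurd this Bool.false_ne_true
      cases h2 : PySem.Str.isIn "mongo" (PySem.Str.lower tech) with
      | true =>
        simp only [h1q, Bool.or_false, Bool.or_true, Bool.false_eq_true, if_false, if_true, optC]
        cases o1 : firstMatch "postgres" (List.map PySem.Str.lower rest) 0 with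
        | none =>
          simp only [Option.map_none]
          rw [pyMinT_zero_head _ _ rfl
            (prio_bound 1 _ 2 _ _ (by decide) (prio_bound 1 _ 3 _ _ (by decide) (prio_nil 1)))]
        | some i1 =>
          simp only [Option.map_some]
          rw [pyMinT_pre1 _ _ _ (by omega) rfl
            (prio_bound 1 _ 2 _ _ (by decide) (prio_bound 1 _ 3 _ _ (by decide) (prio_nil 1)))]
      | false =>
        have h2d : PySem.Str.isIn "mongodb" (PySem.Str.lower tech) = false := by
          cases hq : PySem.Str.isIn "mongodb" (PySem.Str.lower tech) with
          | false => rfl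
          | true =>
            have := str_isIn_mono "mongo" "mongodb" _ (by decide) hq
            rw [h2] at this
            exact absurd this Bool.false_ne_true
        cases h3 : PySem.Str.isIn "mysql" (PySem.Str.lower tech) with
        | true =>
          simp only [h1q, h2d, Bool.or_false, Bool.false_eq_true, if_false, if_true, optC]
          cases o1 : firstMatch "postgres" (List.map PySem.Str.lower rest) 0 with
          | none =>
            cases o2 : firstMatch "mongo" (List.map PySem.Str.lower rest) 0 with
            | none =>
              simp only [Option.map_none]
              rw [pyMinT_zero_head _ _ rfl (prio_bound 2 _ 3 _ _ (by decide) (prio_nil 2))]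
            | some i2 =>
              simp only [Option.map_none, Option.map_some]
              rw [pyMinT_pre1 _ _ _ (by omega) rfl (prio_bound 2 _ 3 _ _ (by decide) (prio_nil 2))]
          | some i1 =>
            cases o2 : firstMatch "mongo" (List.map PySem.Str.lower rest) 0 with
            | none =>
              simp only [Option.map_none, Option.map_some]
              rw [pyMinT_pre1 _ _ _ (by omega) rfl (prio_bound 2 _ 3 _ _ (by decide) (prio_nil 2))]
            | some i2 =>
              simp only [Option.map_some]
              rw [pyMinT_pre2 _ _ _ _ (by omega) (by omega) rfl
                (prio_bound 2 _ 3 _ _ (by decide) (prio_nil 2))]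
        | false =>
          cases h4 : PySem.Str.isIn "firebase" (PySem.Str.lower tech) with
          | true =>
            simp only [h1q, h2d, Bool.or_false, Bool.false_eq_true, if_false, if_true, optC]
            cases o1 : firstMatch "postgres" (List.map PySem.Str.lower rest) 0 with
            | none =>
              cases o2 : firstMatch "mongo" (List.map PySem.Str.lower rest) 0 with
              | none =>
                cases o3 : firstMatch "mysql" (List.map PySem.Str.lower rest) 0 with
                | none =>
                  simp only [Option.map_none]
                  rw [pyMinT_zero_head _ _ rfl (prio_nil 3)]
                | some i3 =>
                  simp only [Option.map_none, Option.map_some]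
                  rw [pyMinT_pre1 _ _ _ (by omega) rfl (prio_nil 3)]
              | some i2 =>
                cases o3 : firstMatch "mysql" (List.map PySem.Str.lower rest) 0 with
                | none =>
                  simp only [Option.map_none, Option.map_some]
                  rw [pyMinT_pre1 _ _ _ (by omega) rfl (prio_nil 3)]
                | some i3 =>
                  simp only [Option.map_none, Option.map_some]
                  rw [pyMinT_pre2 _ _ _ _ (by omega) (by omega) rfl (prio_nil 3)]
            | some i1 =>
              cases o2 : firstMatch "mongo" (List.map PySem.Str.lower rest) 0 with
              | none =>
                cases o3 : firstMatch "mysql" (List.map PySem.Str.lower rest) 0 with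
                | none =>
                  simp only [Option.map_none, Option.map_some]
                  rw [pyMinT_pre1 _ _ _ (by omega) rfl (prio_nil 3)]
                | some i3 =>
                  simp only [Option.map_none, Option.map_some]
                  rw [pyMinT_pre2 _ _ _ _ (by omega) (by omega) rfl (prio_nil 3)]
              | some i2 =>
                cases o3 : firstMatch "mysql" (List.map PySem.Str.lower rest) 0 with
                | none =>
                  simp only [Option.map_none, Option.map_some]
                  rw [pyMinT_pre2 _ _ _ _ (by omega) (by omega) rfl (prio_nil 3)]
                | some i3 =>
                  simp only [Option.map_some]
                  rw [pyMinT_pre3 _ _ _ _ _ (by omega) (by omega) (by omega) rfl (prio_nil 3)]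
          | false =>
            -- no keyword matches the head: all candidates come from the tail, shifted by one
            simp only [h1q, h2d, Bool.or_false, Bool.false_eq_true, if_false]
            rw [show ([] : List (Nat × Int × String)) = List.map shiftT [] from rfl,
              optC_map_shift, optC_map_shift, optC_map_shift, optC_map_shift, pyMinT_map_shift]
            rw [ih]
            cases pyMinT (optC (firstMatch "postgres" (List.map PySem.Str.lower rest) 0) 0 "PostgreSQL"
              (optC (firstMatch "mongo" (List.map PySem.Str.lower rest) 0) 1 "MongoDB"
                (optC (firstMatch "mysql" (List.map PySem.Str.lower rest) 0) 2 "MySQL"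
                  (optC (firstMatch "firebase" (List.map PySem.Str.lower rest) 0) 3 "Firebase" [])))) with
            | none => rfl
            | some c => rfl
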